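-- pv_equiv track=rewrite | github.com/lw3227/CNN-Accelerator-Final-Project-of-CSEE4840- | matlab_old/gen_sram_preload.py | reorder_weights
-- ===== SOURCE A (Python) =====
-- COLS = 4  # SA columns = output channels per pass
--
-- def reorder_weights(w_raw, dot_k, c_in, ch_offset, cols=COLS):
--     """
--     Reorder weights from MATLAB column-major layout to the DOT_K sequence
--     that the Conv SA expects, matching the standalone TB reorder logic.
--
--     w_raw: flat list of cols*dot_k int8 values for one pass, in MATLAB order.
--            Layout: ch0_all_k, ch1_all_k, ch2_all_k, ch3_all_k
--     Returns: list of (cols*dot_k) interleaved values, grouped as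
--              [col0_k0, col1_k0, col2_k0, col3_k0, col0_k1, ...]
--     """
--     w_tap = [0] * (cols * dot_k)
--     for ch in range(cols):
--         for rd_col_idx in range(dot_k):
--             c_in_i = rd_col_idx % c_in
--             kw     = (rd_col_idx // c_in) % 3
--             kh     = 2 - (rd_col_idx // (3 * c_in))
--             matlab_idx = kh + 3 * kw + 9 * c_in_i
--             w_tap[ch * dot_k + rd_col_idx] = w_raw[ch_offset + ch * dot_k + matlab_idx]
--     return w_tap
-- ===== SOURCE B (Python) =====
-- COLS = 4  # SA columns = output channels per pass
--
-- def reorder_weights(w_raw, dot_k, c_in, ch_offset, cols=COLS):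
--     if cols <= 0:
--         return []
--     # Generate the column-major read offsets with a mixed-radix odometer
--     # (kh counting down, kw and c_in_i counting up) instead of recovering
--     # the three digits from each position with // and % arithmetic.
--     offs = []
--     kh = 2
--     while len(offs) < dot_k:
--         for kw in range(3):
--             for c_in_i in range(c_in):
--                 offs.append(kh + 3 * kw + 9 * c_in_i)
--         kh -= 1
--     offs = offs[:dot_k]
--     out = []
--     for ch in range(cols):
--         base = ch_offset + ch * dot_k
--         out.extend(w_raw[base + m] for m in offs)
--     return out
-- ===== Notes on version B (the rewrite author's own statement) =====
-- stated objective: alternative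
-- what changed: B generates the column-major read-offset sequence with a mixed-radix odometer (kh counting down in an outer while, kw and c_in_i counting up in nested for loops, no division or modulus anywhere), truncates it to dot_k, and then builds the output by extending a list per channel, instead of A's preallocated zero array filled by recovering the three digits of every position with // and % and writing by index; …
-- outside the precondition, e.g. on reorder_weights([5, 6, 7], 1, -1, 0, 1): A returns [7], B does not finish within the time limit; on reorder_weights([], -2, 1, 0, -3): A returns [0, 0, 0, 0, 0, 0], B returns []
import Mathlib
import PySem

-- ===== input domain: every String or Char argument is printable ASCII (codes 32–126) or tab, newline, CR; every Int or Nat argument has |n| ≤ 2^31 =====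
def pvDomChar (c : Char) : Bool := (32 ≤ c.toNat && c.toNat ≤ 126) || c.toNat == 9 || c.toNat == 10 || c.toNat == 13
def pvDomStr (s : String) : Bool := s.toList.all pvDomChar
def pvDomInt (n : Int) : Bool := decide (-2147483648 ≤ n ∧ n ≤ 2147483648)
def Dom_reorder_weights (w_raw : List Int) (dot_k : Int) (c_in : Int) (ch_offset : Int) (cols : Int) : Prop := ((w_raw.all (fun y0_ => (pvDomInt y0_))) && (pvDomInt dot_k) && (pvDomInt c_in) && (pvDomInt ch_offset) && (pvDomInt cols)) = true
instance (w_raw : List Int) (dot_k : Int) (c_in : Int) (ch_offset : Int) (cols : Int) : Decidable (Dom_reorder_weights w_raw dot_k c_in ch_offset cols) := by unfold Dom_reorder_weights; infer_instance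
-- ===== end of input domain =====

-- B replaces A's per-position div/mod digit recovery and indexed writes into a zero array by a
-- mixed-radix odometer that generates the read-offset sequence by counting, then list extension
-- per channel (alternative decomposition, same cost).

-- ===== PORT A =====
def reorder_weights (w_raw : List Int) (dot_k : Int) (c_in : Int) (ch_offset : Int) (cols : Int) : List Int :=
  (List.range cols.toNat).foldl (fun (w_tap : List Int) (ch : Nat) =>
    (List.range dot_k.toNat).foldl (fun (w_tap : List Int) (rd_col_idx : Nat) =>
      let c_in_i := PySem.Int.mod (rd_col_idx : Int) c_in
      let kw := PySem.Int.mod (PySem.Int.floordiv (rd_col_idx : Int) c_in) 3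
      let kh := 2 - PySem.Int.floordiv (rd_col_idx : Int) (3 * c_in)
      let matlab_idx := kh + 3 * kw + 9 * c_in_i
      PySem.List.pySetD w_tap ((ch : Int) * dot_k + (rd_col_idx : Int))
        (PySem.List.pyGetD w_raw (ch_offset + (ch : Int) * dot_k + matlab_idx) 0)) w_tap)
    (List.replicate (cols * dot_k).toNat 0)

-- ===== PORT B =====
-- the odometer: while len(offs) < dot_k, append one kh-block (kw, c_in_i counting up), kh -= 1.
-- Fuel makes the recursion total; inside Pre_ (c_in > 0) every round grows offs by 3*c_in ≥ 3,
-- so dot_k.toNat rounds are never exhausted before the while condition fails.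
def reorderOffs (dot_k : Int) (c_in : Int) : Nat → Int → List Int → List Int
  | 0, _, offs => offs
  | fuel + 1, kh, offs =>
    if (offs.length : Int) < dot_k then
      reorderOffs dot_k c_in fuel (kh - 1)
        (offs ++ (List.range 3).flatMap (fun (kw : Nat) =>
          (List.range c_in.toNat).map (fun (c_in_i : Nat) => kh + 3 * (kw : Int) + 9 * (c_in_i : Int))))
    else offs

def reorder_weights_alt (w_raw : List Int) (dot_k : Int) (c_in : Int) (ch_offset : Int) (cols : Int) : List Int :=
  if cols ≤ 0 then [] else
  -- offs[:dot_k] : List.take is exact here (for dot_k < 0 the while never ran and offs = [])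
  let offs := (reorderOffs dot_k c_in dot_k.toNat 2 []).take dot_k.toNat
  (List.range cols.toNat).foldl (fun (out : List Int) (ch : Nat) =>
    let base := ch_offset + (ch : Int) * dot_k
    out ++ offs.map (fun m => PySem.List.pyGetD w_raw (base + m) 0)) []

-- ===== PRECONDITION & SPEC =====
-- A's column-major index for DOT_K position rd (used only to state the in-range condition)
def permEntry (c_in : Int) (rd : Int) : Int :=
  (2 - PySem.Int.floordiv rd (3 * c_in)) + 3 * PySem.Int.mod (PySem.Int.floordiv rd c_in) 3
    + 9 * PySem.Int.mod rd c_in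

-- Pre_ excludes (i) negative-count corners cols<0 ∧ dot_k<0, where A accidentally returns a
-- nonempty zero list from [0]*(cols*dot_k) while its loops never run; (ii) c_in ≤ 0 with both
-- loops running: c_in is a channel count, A raises ZeroDivisionError at c_in = 0, and at
-- c_in < 0 A returns values from negative-modulus arithmetic while B's odometer never makes
-- progress and diverges; (iii) out-of-range reads, where A raises IndexError.  The two explicit
-- bounds on cols and dot_k are CONSEQUENCES of the in-range condition (cols distinct
-- stride-dot_k read positions, and the kh term drifting by 1 every 3*c_in steps, must all fit
-- in [-len, len)), stated so the quantifier ranges are bounded by the list length; the min's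
-- are the identity under them.
def Pre_reorder_weights (w_raw : List Int) (dot_k : Int) (c_in : Int) (ch_offset : Int) (cols : Int) : Prop :=
  (0 ≤ dot_k ∨ 0 ≤ cols) ∧
  (0 < dot_k → 0 < cols →
    0 < c_in ∧
    cols ≤ 2 * (w_raw.length : Int) ∧
    dot_k ≤ (2 * (w_raw.length : Int) + 16) * (2 * (w_raw.length : Int) + 16) ∧
    ∀ ch ∈ List.range (min cols (2 * (w_raw.length : Int))).toNat,
      ∀ rd ∈ List.range (min dot_k ((2 * (w_raw.length : Int) + 16) * (2 * (w_raw.length : Int) + 16))).toNat,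
        PySem.Raise.InRange w_raw.length (ch_offset + (ch : Int) * dot_k + permEntry c_in (rd : Int)))
instance (w_raw : List Int) (dot_k : Int) (c_in : Int) (ch_offset : Int) (cols : Int) : Decidable (Pre_reorder_weights w_raw dot_k c_in ch_offset cols) := by unfold Pre_reorder_weights; infer_instance

def pvWitness_reorder_weights : List Int × Int × Int × Int × Int :=
  ([1, 2, 3, 4, 5, 6, 7, 8, 9, 10, 11, 12, 13, 14, 15, 16, 17, 18], 9, 1, 0, 2)

def Spec_reorder_weights (w_raw : List Int) (dot_k : Int) (c_in : Int) (ch_offset : Int) (cols : Int) (out : List Int) : Prop := out = reorder_weights_alt w_raw dot_k c_in ch_offset cols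
instance (w_raw : List Int) (dot_k : Int) (c_in : Int) (ch_offset : Int) (cols : Int) (out : List Int) : Decidable (Spec_reorder_weights w_raw dot_k c_in ch_offset cols out) := by unfold Spec_reorder_weights; infer_instance

-- ===== CLAIM (what is proved, stated in full; the proofs are below) =====
def Claim_equal_reorder_weights : Prop := ∀ (w_raw : List Int) (dot_k : Int) (c_in : Int) (ch_offset : Int) (cols : Int), Dom_reorder_weights w_raw dot_k c_in ch_offset cols → Pre_reorder_weights w_raw dot_k c_in ch_offset cols → Spec_reorder_weights w_raw dot_k c_in ch_offset cols (reorder_weights w_raw dot_k c_in ch_offset cols)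

-- ===== LEMMAS AND PROOFS =====

-- pySetD at a nonnegative index is List.set
theorem pySetD_nonneg (xs : List Int) (i : Int) (v : Int) (h : 0 ≤ i) :
    PySem.List.pySetD xs i v = xs.set i.toNat v := by
  by_cases hlt : i < (xs.length : Int)
  · simp [PySem.List.pySetD, PySem.List.pySet?, PySem.List.pyIdx?, h, hlt]
  · have hge : (xs.length : Int) ≤ i := by omega
    have hnone : PySem.List.pySet? xs i v = none := by
      rw [PySem.List.pySet?_eq_none_iff]
      simp [PySem.Raise.InRange]; omega
    rw [PySem.List.pySetD, hnone]
    have hset : xs.set i.toNat v = xs := List.set_eq_of_length_le (by omega)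
    simp [hset]

-- the inner loop writes (range dk).map g over the slice starting at pre.length
theorem inner_foldl (g : Nat → Int) : ∀ (dk : Nat) (pre post : List Int), dk ≤ post.length →
    (List.range dk).foldl (fun w rd => w.set (pre.length + rd) (g rd)) (pre ++ post)
      = pre ++ (List.range dk).map g ++ post.drop dk := by
  intro dk
  induction dk with
  | zero => intro pre post _; simp
  | succ n ih =>
    intro pre post h
    rw [List.range_succ, List.foldl_append, List.map_append]
    simp only [List.foldl_cons, List.foldl_nil, List.map_cons, List.map_nil]
    rw [ih pre post (by omega)]
    have hn : n < post.length := by omega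
    rw [List.drop_eq_getElem_cons hn]
    have hlen : (pre ++ (List.range n).map g).length = pre.length + n := by simp
    rw [show pre ++ (List.range n).map g ++ post[n] :: post.drop (n + 1)
          = (pre ++ (List.range n).map g) ++ post[n] :: post.drop (n + 1) by simp]
    rw [List.set_append_right _ _ (by omega)]
    simp only [hlen, List.append_assoc, List.append_cancel_left_eq]
    have h0 : pre.length + n - (pre.length + n) = 0 := by omega
    rw [h0, List.set_cons_zero]
    simp

theorem len_flat (k dk : Nat) (g : Nat → Nat → Int) :
    ((List.range k).flatMap (fun ch => (List.range dk).map (g ch))).length = k * dk := by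
  induction k with
  | zero => simp
  | succ n ih => rw [List.range_succ]; simp [ih]; ring

-- the whole double loop fills the zero array with the flatMap, leaving m trailing zeros
theorem outer_foldl (dk : Nat) (g : Nat → Nat → Int) : ∀ (k m : Nat),
    (List.range k).foldl (fun w ch =>
        (List.range dk).foldl (fun w rd => w.set (ch * dk + rd) (g ch rd)) w)
      (List.replicate (k * dk + m) 0)
      = (List.range k).flatMap (fun ch => (List.range dk).map (g ch)) ++ List.replicate m 0 := by
  intro k
  induction k with
  | zero => intro m; simp
  | succ n ih =>
    intro m
    rw [List.range_succ, List.foldl_append]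
    simp only [List.foldl_cons, List.foldl_nil]
    rw [show (n + 1) * dk + m = n * dk + (dk + m) by ring, ih (dk + m)]
    have hpre := len_flat n dk g
    have := inner_foldl (g n) dk ((List.range n).flatMap (fun ch => (List.range dk).map (g ch)))
      (List.replicate (dk + m) 0) (by simp)
    rw [hpre] at this
    rw [this]
    simp [List.drop_replicate]

-- flatMap over range n of c-maps with index t*c+i is a single map over range (n*c)
theorem flat_index (c : Nat) (F : Nat → Int) : ∀ n : Nat,
    (List.range n).flatMap (fun t => (List.range c).map (fun i => F (t * c + i)))
      = (List.range (n * c)).map F := by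
  intro n
  induction n with
  | zero => simp
  | succ m ih =>
    rw [List.range_succ, List.flatMap_append, ih,
        show (m + 1) * c = m * c + c by ring, List.range_add]
    simp [List.map_map, Function.comp_def]

-- one odometer block (kh = 2 - b) is the b-th stretch of A's index sequence
theorem block_eq (c_in : Int) (hc : 0 < c_in) (b : Nat) :
    (List.range 3).flatMap (fun (kw : Nat) =>
        (List.range c_in.toNat).map (fun (ci : Nat) => (2 - (b : Int)) + 3 * (kw : Int) + 9 * (ci : Int)))
      = (List.range (3 * c_in.toNat)).map
          (fun j => permEntry c_in ((b * (3 * c_in.toNat) + j : Nat) : Int)) := by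
  set c := c_in.toNat with hcdef
  have hcc : (c : Int) = c_in := by omega
  have chunk : ∀ t ∈ List.range 3,
      (List.range c).map (fun (ci : Nat) => (2 - (b : Int)) + 3 * (t : Int) + 9 * (ci : Int))
        = (List.range c).map (fun (ci : Nat) => permEntry c_in ((b * (3 * c) + (t * c + ci) : Nat) : Int)) := by
    intro t htm
    have ht : t < 3 := List.mem_range.mp htm
    apply List.map_congr_left
    intro ci hci
    have hcilt : ci < c := List.mem_range.mp hci
    set rd : Int := ((b * (3 * c) + (t * c + ci) : Nat) : Int) with hrd
    have hrdval : rd = (3 * (b : Int) + t) * c_in + ci := by push_cast [hrd]; rw [← hcc]; ring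
    have hci0 : (0 : Int) ≤ (ci : Int) := by positivity
    have hcilt' : (ci : Int) < c_in := by omega
    have hmod : PySem.Int.mod rd c_in = ci := by
      rw [PySem.Int.mod_eq_emod_of_pos hc, hrdval]
      rw [show (3 * (b : Int) + t) * c_in + ci = ci + c_in * (3 * b + t) by ring,
          Int.add_mul_emod_self_left]
      exact Int.emod_eq_of_lt hci0 hcilt'
    have hdiv : PySem.Int.floordiv rd c_in = 3 * (b : Int) + t := by
      rw [PySem.Int.floordiv_eq_iff_of_pos hc]
      constructor
      · rw [hrdval]; nlinarith
      · rw [hrdval]; nlinarith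
    have hmod3 : PySem.Int.mod (3 * (b : Int) + t) 3 = t := by
      rw [PySem.Int.mod_eq_emod_of_pos (by omega : (0:Int) < 3)]
      rw [show (3 : Int) * b + t = t + 3 * b by ring, Int.add_mul_emod_self_left]
      exact Int.emod_eq_of_lt (by positivity) (by exact_mod_cast ht)
    have hdiv3 : PySem.Int.floordiv rd (3 * c_in) = b := by
      rw [PySem.Int.floordiv_eq_iff_of_pos (by omega : (0:Int) < 3 * c_in)]
      constructor
      · rw [hrdval]; nlinarith
      · rw [hrdval]
        have h1 : (t : Int) ≤ 2 := by exact_mod_cast Nat.lt_succ_iff.mp ht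
        nlinarith
    simp only [permEntry, hmod, hdiv, hmod3, hdiv3]
  rw [List.flatMap_congr chunk,
      flat_index c (fun j => permEntry c_in ((b * (3 * c) + j : Nat) : Int)) 3]

-- the odometer with enough fuel, then truncated, is A's index sequence
theorem reorderOffs_spec (dot_k c_in : Int) (hc : 0 < c_in) : ∀ (fuel b : Nat),
    dot_k ≤ ((b : Int) + fuel) * (3 * c_in) →
    (reorderOffs dot_k c_in fuel (2 - (b : Int))
        ((List.range (b * (3 * c_in.toNat))).map (fun (rd : Nat) => permEntry c_in (rd : Int)))).take dot_k.toNat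
      = (List.range dot_k.toNat).map (fun (rd : Nat) => permEntry c_in (rd : Int)) := by
  intro fuel
  induction fuel with
  | zero =>
    intro b hb
    have hcc : ((c_in.toNat : Nat) : Int) = c_in := by omega
    have hcast : ((b * (3 * c_in.toNat) : Nat) : Int) = (b : Int) * (3 * c_in) := by
      push_cast [hcc]; ring
    have hb' : dot_k ≤ (b : Int) * (3 * c_in) := by push_cast at hb; linarith
    have hdk : dot_k.toNat ≤ b * (3 * c_in.toNat) := by omega
    simp only [reorderOffs]
    rw [← List.map_take, List.take_range]
    congr 2
    omega
  | succ n ih =>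
    intro b hb
    simp only [reorderOffs]
    split_ifs with hlt
    · have hkh : (2 : Int) - (b : Int) - 1 = 2 - ((b + 1 : Nat) : Int) := by push_cast; ring
      rw [block_eq c_in hc b,
          show List.map (fun j => permEntry c_in ((b * (3 * c_in.toNat) + j : Nat) : Int))
                (List.range (3 * c_in.toNat))
              = List.map (fun (rd : Nat) => permEntry c_in (rd : Int))
                ((List.range (3 * c_in.toNat)).map (b * (3 * c_in.toNat) + ·)) by
            simp [List.map_map, Function.comp_def],
          ← List.map_append, ← List.range_add, hkh]
      rw [show b * (3 * c_in.toNat) + 3 * c_in.toNat = (b + 1) * (3 * c_in.toNat) by ring]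
      apply ih
      push_cast
      push_cast at hb
      linarith
    · simp only [List.length_map, List.length_range, not_lt] at hlt
      rw [← List.map_take, List.take_range]
      congr 2
      have hcc : ((c_in.toNat : Nat) : Int) = c_in := by omega
      have : ((b * (3 * c_in.toNat) : Nat) : Int) = (b : Int) * (3 * c_in) := by push_cast [hcc]; ring
      omega

-- B's offs list equals A's index sequence (trivially when dot_k ≤ 0, via the odometer otherwise)
theorem offs_eq (dot_k c_in : Int) (h : dot_k ≤ 0 ∨ 0 < c_in) :
    (reorderOffs dot_k c_in dot_k.toNat 2 []).take dot_k.toNat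
      = (List.range dot_k.toNat).map (fun (rd : Nat) => permEntry c_in (rd : Int)) := by
  rcases h with h | hc
  · have h0 : dot_k.toNat = 0 := by omega
    simp [h0]
  · have := reorderOffs_spec dot_k c_in hc dot_k.toNat 0 (by
      have h2 : ((dot_k.toNat : Int)) * 1 ≤ (dot_k.toNat : Int) * (3 * c_in) :=
        mul_le_mul_of_nonneg_left (by omega) (by positivity)
      have h3 : dot_k ≤ ((dot_k.toNat : Nat) : Int) := by omega
      push_cast
      nlinarith)
    simpa using this

-- ===== VERDICT (by name: the statement is the Claim_ definition above) =====
theorem reorder_weights_spec : Claim_equal_reorder_weights := by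
  intro w_raw dot_k c_in ch_offset cols _ hpre
  obtain ⟨hsign, hrun⟩ := hpre
  unfold Spec_reorder_weights
  set dk := dot_k.toNat with hdk
  set g : Nat → Nat → Int := fun ch rd =>
    PySem.List.pyGetD w_raw (ch_offset + (ch : Int) * dot_k + permEntry c_in (rd : Int)) 0 with hg
  -- rewrite A's fold body into the set-based form
  have hbody : ∀ ch ∈ List.range cols.toNat,
      (fun (w_tap : List Int) =>
        (List.range dk).foldl (fun (w_tap : List Int) (rd_col_idx : Nat) =>
          let c_in_i := PySem.Int.mod (rd_col_idx : Int) c_in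
          let kw := PySem.Int.mod (PySem.Int.floordiv (rd_col_idx : Int) c_in) 3
          let kh := 2 - PySem.Int.floordiv (rd_col_idx : Int) (3 * c_in)
          let matlab_idx := kh + 3 * kw + 9 * c_in_i
          PySem.List.pySetD w_tap ((ch : Int) * dot_k + (rd_col_idx : Int))
            (PySem.List.pyGetD w_raw (ch_offset + (ch : Int) * dot_k + matlab_idx) 0)) w_tap)
      = (fun w_tap => (List.range dk).foldl (fun w rd => w.set (ch * dk + rd) (g ch rd)) w_tap) := by
    intro ch _
    funext w_tap
    apply PySem.List.foldl_congr_mem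
    intro w rd hrd
    have hrdlt : rd < dk := List.mem_range.mp hrd
    have hdpos : 0 < dot_k := by omega
    have hcast : dot_k = (dk : Int) := by omega
    simp only
    rw [pySetD_nonneg _ _ _ (by
      have h1 : (0:Int) ≤ (ch:Int) * dot_k := mul_nonneg (Int.natCast_nonneg ch) hdpos.le
      have h2 := Int.natCast_nonneg rd
      linarith)]
    congr 1
    rw [hcast]
    have : (ch:Int) * (dk:Int) + (rd:Int) = ((ch * dk + rd : Nat) : Int) := by push_cast; ring
    rw [this, Int.toNat_natCast]
  have hA : reorder_weights w_raw dot_k c_in ch_offset cols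
      = (List.range cols.toNat).flatMap (fun ch => (List.range dk).map (g ch)) := by
    unfold reorder_weights
    calc (List.range cols.toNat).foldl _ (List.replicate (cols * dot_k).toNat 0)
        = (List.range cols.toNat).foldl (fun w ch =>
            (List.range dk).foldl (fun w rd => w.set (ch * dk + rd) (g ch rd)) w)
            (List.replicate (cols.toNat * dk + 0) 0) := by
          have hinit : (cols * dot_k).toNat = cols.toNat * dk + 0 := by
            by_cases hc : 0 ≤ cols
            · by_cases hd : 0 ≤ dot_k
              · have : cols * dot_k = ((cols.toNat * dk : Nat) : Int) := by push_cast; rw [Int.toNat_of_nonneg hc, Int.toNat_of_nonneg hd]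
                omega
              · have h1 : cols * dot_k ≤ 0 := mul_nonpos_of_nonneg_of_nonpos hc (by omega)
                have hdk0 : dk = 0 := by omega
                simp [hdk0]
                omega
            · have hd : 0 ≤ dot_k := by tauto
              have h1 : cols * dot_k ≤ 0 := mul_nonpos_of_nonpos_of_nonneg (by omega) hd
              have hc0 : cols.toNat = 0 := by omega
              simp [hc0]
              omega
          rw [hinit]
          apply PySem.List.foldl_congr_mem
          intro acc ch hch
          exact congrFun (hbody ch hch) acc
      _ = (List.range cols.toNat).flatMap (fun ch => (List.range dk).map (g ch)) ++ List.replicate 0 0 :=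
          outer_foldl dk g cols.toNat 0
      _ = (List.range cols.toNat).flatMap (fun ch => (List.range dk).map (g ch)) := by simp
  rw [hA]
  -- B's side
  unfold reorder_weights_alt
  by_cases hcols : cols ≤ 0
  · have h0 : cols.toNat = 0 := by omega
    simp [hcols, h0]
  · rw [if_neg hcols]
    have hcase : dot_k ≤ 0 ∨ 0 < c_in := by
      by_cases hd : dot_k ≤ 0
      · exact Or.inl hd
      · exact Or.inr (hrun (by omega) (by omega)).1
    rw [offs_eq dot_k c_in hcase]
    rw [PySem.List.foldl_append_eq_flatMap]
    simp only [List.nil_append, List.map_map]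
    apply List.flatMap_congr
    intro ch _
    apply List.map_congr_left
    intro rd _
    rfl
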